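-- pv_equiv track=rewrite | github.com/pypi-data/pypi-mirror-89 | packages/twitter2discord/twitter2discord-0.1.6-py2.py3-none-any.whl/twitter2discord/utils.py | fix_max_length
-- ===== SOURCE A (Python) =====
-- MAX_CONTENT_GG_LENGTH = 1500
--
-- def fix_max_length(text_content, max_length=MAX_CONTENT_GG_LENGTH):
--     """Convert long text to valid array text
--
--     Arguments:
--         text_content
--
--     Keyword Arguments:
--         max_length {[int]} -- (default: {MAX_CONTENT_GG_LENGTH})
--
--     Returns:
--         array
--     """
--     text_array = []
--     if len(text_content) <= max_length:
--         return [text_content]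
--     text_cache = text_content
--     while len(text_cache) > max_length:
--         text_cut = text_cache[:max_length]
--         try:
--             last_break_line = text_cut.rindex('\n')
--         except ValueError:
--             last_break_line = len(text_cut)
--         text_array.append(text_cut[:last_break_line])
--         text_cache = text_cache[last_break_line:]
--     text_array.append(text_cache)
--     return text_array
-- ===== SOURCE B (Python) =====
-- MAX_CONTENT_GG_LENGTH = 1500
--
-- def fix_max_length(text_content, max_length=MAX_CONTENT_GG_LENGTH):
--     n = len(text_content)
--     if n <= max_length:
--         return [text_content]
--     # index table of all newline positions, built once
--     newlines = []
--     i = text_content.find('\n')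
--     while i != -1:
--         newlines.append(i)
--         i = text_content.find('\n', i + 1)
--     m = len(newlines)
--     pieces = []
--     p = 0
--     k = 0
--     while n - p > max_length:
--         while k < m and newlines[k] < p:
--             k += 1
--         j = k
--         while j < m and newlines[j] < p + max_length:
--             j += 1
--         cut = newlines[j - 1] if j > k else p + max_length
--         pieces.append(text_content[p:cut])
--         p = cut
--     pieces.append(text_content[p:])
--     return pieces
-- ===== Notes on version B (the rewrite author's own statement) =====
-- stated objective: alternative
-- what changed: B precomputes the list of all newline positions once and walks it with two monotone pointers to pick each cut, slicing pieces directly out of the original string, instead of A's per-window slice+rindex rescans and repeated re-slicing of the whole remaining text; Pre_ excludes only the inputs on which A's while loop never terminates (max_length < 1 with text longer than max_length, or a newline followed by a newline-free gap of at least max_length characters before the tail), where A returns nothing at all.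
import Mathlib
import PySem

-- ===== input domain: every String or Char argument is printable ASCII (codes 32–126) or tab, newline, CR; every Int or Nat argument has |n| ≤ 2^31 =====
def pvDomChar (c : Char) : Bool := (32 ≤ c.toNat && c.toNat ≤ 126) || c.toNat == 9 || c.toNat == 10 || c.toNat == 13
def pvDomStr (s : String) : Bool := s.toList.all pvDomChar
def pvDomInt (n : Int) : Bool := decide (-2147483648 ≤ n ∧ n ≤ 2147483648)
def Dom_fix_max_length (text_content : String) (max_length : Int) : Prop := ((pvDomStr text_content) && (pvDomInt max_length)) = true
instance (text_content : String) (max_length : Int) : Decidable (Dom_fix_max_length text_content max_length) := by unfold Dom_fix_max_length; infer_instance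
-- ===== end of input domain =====

-- B replaces A's per-window slice+rindex rescans with a newline-position table walked by
-- monotone pointers; equivalence is proved on Pre_, which excludes exactly the inputs on
-- which A's while loop never terminates.

-- ===== PORT A =====
-- text_cut.rindex('\n'): greatest index holding '\n', none when absent (Python raises
-- ValueError then; A catches it).  Hand port, exact: PySem has no rindex.
def rindexNl : List Char → Option Nat
  | [] => none
  | c :: cs =>
    match rindexNl cs with
    | some j => some (j + 1)
    | none => if c = '\n' then some 0 else none

-- A's while loop, fuel-bounded; fuel = length + 1 suffices on every input Pre_ admits.
def fixALoop (maxl : Int) (fuel : Nat) (cache : List Char) (acc : List String) : List String :=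
  match fuel with
  | 0 => acc
  | f + 1 =>
    if (cache.length : Int) > maxl then
      let cut := PySem.List.slice cache none (some maxl)
      let lb : Int :=
        match rindexNl cut with
        | some j => (j : Int)
        | none => (cut.length : Int)
      fixALoop maxl f (PySem.List.slice cache (some lb) none)
        (acc ++ [String.ofList (PySem.List.slice cut none (some lb))])
    else acc ++ [String.ofList cache]

def fix_max_length (text_content : String) (max_length : Int) : List String :=
  let cs := text_content.toList
  if (cs.length : Int) ≤ max_length then [text_content]
  else fixALoop max_length (cs.length + 1) cs []

-- ===== PORT B =====
-- the find-loop of Source B: positions of '\n', in increasing order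
def nlIndicesFrom (s : Nat) : List Char → List Nat
  | [] => []
  | c :: cs => if c = '\n' then s :: nlIndicesFrom (s + 1) cs else nlIndicesFrom (s + 1) cs

-- Source B's inner 'while k < m and newlines[k] < p: k += 1'; the suffix newlines[k:] stands for k
def skipLt (p : Int) : List Nat → List Nat
  | [] => []
  | x :: xs => if (x : Int) < p then skipLt p xs else x :: xs

-- Source B's inner j-scan: last element of the maximal prefix of elements < b (none if empty)
def lastLt (b : Int) : List Nat → Option Nat
  | [] => none
  | x :: xs =>
    if (x : Int) < b then
      match lastLt b xs with
      | some y => some y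
      | none => some x
    else none

-- B's while loop, fuel-bounded exactly like A's
def fixBLoop (text : List Char) (n maxl : Int) (fuel : Nat) (p : Int) (pend : List Nat)
    (acc : List String) : List String :=
  match fuel with
  | 0 => acc
  | f + 1 =>
    if n - p > maxl then
      let pend' := skipLt p pend
      let cut : Int :=
        match lastLt (p + maxl) pend' with
        | some y => (y : Int)
        | none => p + maxl
      fixBLoop text n maxl f cut pend'
        (acc ++ [String.ofList (PySem.List.slice text (some p) (some cut))])
    else acc ++ [String.ofList (PySem.List.slice text (some p) none)]

def fix_max_length_alt (text_content : String) (max_length : Int) : List String :=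
  let cs := text_content.toList
  if (cs.length : Int) ≤ max_length then [text_content]
  else fixBLoop cs (cs.length : Int) max_length (cs.length + 1) 0 (nlIndicesFrom 0 cs) []

-- ===== PRECONDITION & SPEC =====
-- Pre_ excludes exactly the inputs on which A's while loop never terminates (so A returns
-- nothing at all): text longer than max_length with max_length < 1, or a newline that is
-- more than max_length characters from the end with no further newline within the next
-- max_length characters (A then cuts an empty piece forever).
def Pre_fix_max_length (text_content : String) (max_length : Int) : Prop :=
  ((text_content.toList.length : Int) ≤ max_length) ∨
  (1 ≤ max_length ∧
    ∀ i, i < text_content.toList.length → text_content.toList[i]? = some '\n' →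
      (text_content.toList.length : Int) - i > max_length →
      ∃ j, j < text_content.toList.length ∧ i < j ∧ (j : Int) < (i : Int) + max_length ∧
        text_content.toList[j]? = some '\n')
instance (text_content : String) (max_length : Int) : Decidable (Pre_fix_max_length text_content max_length) := by
  unfold Pre_fix_max_length; infer_instance

def pvWitness_fix_max_length : String × Int := ("ab\ncd", 3)

def Spec_fix_max_length (text_content : String) (max_length : Int) (out : List String) : Prop := out = fix_max_length_alt text_content max_length
instance (text_content : String) (max_length : Int) (out : List String) : Decidable (Spec_fix_max_length text_content max_length out) := by unfold Spec_fix_max_length; infer_instance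

-- ===== CLAIM (what is proved, stated in full; the proofs are below) =====
def Claim_equal_fix_max_length : Prop := ∀ (text_content : String) (max_length : Int), Dom_fix_max_length text_content max_length → Pre_fix_max_length text_content max_length → Spec_fix_max_length text_content max_length (fix_max_length text_content max_length)

-- ===== LEMMAS AND PROOFS =====

-- rindexNl characterizations
theorem rindexNl_none {xs : List Char} (h : rindexNl xs = none) :
    ∀ k : Nat, xs[k]? ≠ some '\n' := by
  induction xs with
  | nil => intro k; simp
  | cons c cs ih =>
    intro k
    simp only [rindexNl] at h
    cases hrec : rindexNl cs with
    | some j => simp [hrec] at h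
    | none =>
      simp only [hrec] at h
      split at h
      · exact absurd h (by simp)
      · match k with
        | 0 => simpa using ‹¬ c = '\n'›
        | k+1 => simpa using ih hrec k

theorem rindexNl_some {xs : List Char} {j : Nat} (h : rindexNl xs = some j) :
    xs[j]? = some '\n' ∧ ∀ k : Nat, j < k → xs[k]? ≠ some '\n' := by
  induction xs generalizing j with
  | nil => simp [rindexNl] at h
  | cons c cs ih =>
    simp only [rindexNl] at h
    cases hrec : rindexNl cs with
    | some i =>
      simp only [hrec] at h
      obtain rfl : j = i + 1 := by simpa using h.symm
      obtain ⟨h1, h2⟩ := ih hrec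
      refine ⟨by simpa using h1, ?_⟩
      intro k hk
      match k, hk with
      | k+1, hk => simpa using h2 k (by omega)
    | none =>
      simp only [hrec] at h
      split at h
      · obtain rfl : j = 0 := by simpa using h.symm
        refine ⟨by simpa using ‹c = '\n'›, ?_⟩
        intro k hk
        match k, hk with
        | k+1, _ => simpa using rindexNl_none hrec k
      · simp at h

-- nlIndicesFrom characterizations
theorem nl_mem (cs : List Char) (s j : Nat) :
    j ∈ nlIndicesFrom s cs ↔ s ≤ j ∧ cs[j - s]? = some '\n' := by
  induction cs generalizing s with
  | nil => simp [nlIndicesFrom]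
  | cons c cs ih =>
    simp only [nlIndicesFrom]
    split
    · subst ‹c = '\n'›
      constructor
      · intro h
        rcases List.mem_cons.mp h with rfl | h
        · simp
        · obtain ⟨h1, h2⟩ := (ih (s+1)).mp h
          refine ⟨by omega, ?_⟩
          have : j - s = (j - (s+1)) + 1 := by omega
          rw [this]; simpa using h2
      · rintro ⟨h1, h2⟩
        rcases Nat.eq_or_lt_of_le h1 with rfl | hlt
        · exact List.mem_cons_self
        · refine List.mem_cons_of_mem _ ((ih (s+1)).mpr ⟨by omega, ?_⟩)
          have : j - s = (j - (s+1)) + 1 := by omega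
          rw [this] at h2; simpa using h2
    · rw [ih (s+1)]
      constructor
      · rintro ⟨h1, h2⟩
        refine ⟨by omega, ?_⟩
        have : j - s = (j - (s+1)) + 1 := by omega
        rw [this]; simpa using h2
      · rintro ⟨h1, h2⟩
        rcases Nat.eq_or_lt_of_le h1 with rfl | hlt
        · simp at h2; exact absurd h2 ‹¬ c = '\n'›
        · refine ⟨by omega, ?_⟩
          have : j - (s+1) = (j - s) - 1 := by omega
          have hjs : j - s = (j - (s+1)) + 1 := by omega
          rw [hjs] at h2; simpa using h2

theorem nl_lb (cs : List Char) (s : Nat) : ∀ x ∈ nlIndicesFrom s cs, s ≤ x := by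
  intro x hx
  exact ((nl_mem cs s x).mp hx).1

theorem nl_sorted (cs : List Char) (s : Nat) : (nlIndicesFrom s cs).Pairwise (· < ·) := by
  induction cs generalizing s with
  | nil => simp [nlIndicesFrom]
  | cons c cs ih =>
    simp only [nlIndicesFrom]
    split
    · refine List.Pairwise.cons ?_ (ih (s+1))
      intro x hx
      have := nl_lb cs (s+1) x hx
      omega
    · exact ih (s+1)

-- skipLt facts
theorem skipLt_sublist (p : Int) (l : List Nat) : (skipLt p l).Sublist l := by
  induction l with
  | nil => simp [skipLt]
  | cons x xs ih =>
    simp only [skipLt]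
    split
    · exact ih.trans (List.sublist_cons_self x xs)
    · exact List.Sublist.refl _

theorem skipLt_suffix (p : Int) (l : List Nat) : ∃ d, l = d ++ skipLt p l := by
  induction l with
  | nil => exact ⟨[], rfl⟩
  | cons x xs ih =>
    simp only [skipLt]
    split
    · obtain ⟨d, hd⟩ := ih
      exact ⟨x :: d, by simp [← hd]⟩
    · exact ⟨[], rfl⟩

theorem skipLt_mem_of {p : Int} {l : List Nat} {x : Nat}
    (hx : x ∈ l) (hge : ¬ ((x : Int) < p)) : x ∈ skipLt p l := by
  induction l with
  | nil => simp at hx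
  | cons y ys ih =>
    simp only [skipLt]
    split
    · rcases List.mem_cons.mp hx with rfl | h
      · exact absurd ‹(x:Int) < p› hge
      · exact ih h
    · exact hx

theorem skipLt_lower {p : Int} {l : List Nat} (hs : l.Pairwise (· < ·)) :
    ∀ x ∈ skipLt p l, ¬ ((x : Int) < p) := by
  induction l with
  | nil => intro x hx; simp [skipLt] at hx
  | cons y ys ih =>
    intro x hx
    simp only [skipLt] at hx
    split at hx
    · exact ih hs.of_cons x hx
    · rcases List.mem_cons.mp hx with rfl | h
      · assumption
      · have hyx := (List.pairwise_cons.mp hs).1 x h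
        have hy : ¬ ((y:Int) < p) := by assumption
        intro hc; omega

-- lastLt computations on sorted lists
theorem lastLt_eq_none {b : Int} {l : List Nat} (h : ∀ z ∈ l, ¬ ((z : Int) < b)) :
    lastLt b l = none := by
  cases l with
  | nil => rfl
  | cons x xs =>
    simp only [lastLt]
    rw [if_neg (h x List.mem_cons_self)]

theorem lastLt_eq_some {b : Int} {l : List Nat} {y : Nat} (hs : l.Pairwise (· < ·))
    (hy : y ∈ l) (hyb : (y : Int) < b) (hmax : ∀ z ∈ l, (z : Int) < b → z ≤ y) :
    lastLt b l = some y := by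
  induction l generalizing y with
  | nil => simp at hy
  | cons x xs ih =>
    rcases List.mem_cons.mp hy with rfl | hmem
    · have hnone : lastLt b xs = none := by
        apply lastLt_eq_none
        intro z hz hc
        have hzy := hmax z (List.mem_cons_of_mem _ hz) hc
        have := (List.pairwise_cons.mp hs).1 z hz
        omega
      simp only [lastLt, hnone, if_pos hyb]
    · have hxy : x < y := (List.pairwise_cons.mp hs).1 y hmem
      have hxb : (x:Int) < b := by
        have : (x:Int) < (y:Int) := by exact_mod_cast hxy
        omega
      have hrec : lastLt b xs = some y :=
        ih hs.of_cons hmem hyb (fun z hz hc => hmax z (List.mem_cons_of_mem _ hz) hc)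
      simp only [lastLt, if_pos hxb, hrec]

-- the core lockstep lemma
theorem loop_eq (cs : List Char) (maxl : Int) (hml : 0 ≤ maxl) :
    ∀ (fuel : Nat) (p : Nat) (pend : List Nat) (acc : List String),
      p ≤ cs.length →
      (∃ pre, nlIndicesFrom 0 cs = pre ++ pend) →
      (∀ x ∈ nlIndicesFrom 0 cs, x ∉ pend → (x : Int) < (p : Int)) →
      fixALoop maxl fuel (cs.drop p) acc
        = fixBLoop cs (cs.length : Int) maxl fuel (p : Int) pend acc := by
  intro fuel
  induction fuel with
  | zero => intro p pend acc _ _ _; rfl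
  | succ f ih =>
    intro p pend acc hp hpre hinv
    have hclen : ((cs.drop p).length : Int) = (cs.length : Int) - (p : Int) := by
      rw [List.length_drop]; omega
    by_cases hcond : (cs.length : Int) - (p : Int) > maxl
    · -- loop body runs
      set nls := nlIndicesFrom 0 cs with hnls
      set w := maxl.toNat with hwdef
      have hw : (w : Int) = maxl := Int.toNat_of_nonneg hml
      have hgap : p + w < cs.length := by omega
      set W := PySem.List.slice (cs.drop p) none (some maxl) with hWdef
      have hWtake : W = (cs.drop p).take w := PySem.List.slice_to _ hml
      have hWget : ∀ k : Nat, W[k]? = if k < w then cs[p + k]? else none := by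
        intro k
        rw [hWtake, List.getElem?_take, List.getElem?_drop]
      have hWlen : W.length = w := by
        rw [hWtake, List.length_take]; omega
      set SK := skipLt (p : Int) pend with hSKdef
      have hnls_sorted : nls.Pairwise (· < ·) := nl_sorted cs 0
      have hpend_sorted : pend.Pairwise (· < ·) := by
        obtain ⟨pre, hpre⟩ := hpre
        exact hnls_sorted.sublist (hpre ▸ (List.sublist_append_right pre pend))
      have hSK_sorted : SK.Pairwise (· < ·) :=
        hpend_sorted.sublist (skipLt_sublist _ _)
      have hSKmem : ∀ x : Nat, x ∈ SK ↔ (x ∈ nls ∧ (p : Int) ≤ (x : Int)) := by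
        intro x
        constructor
        · intro hx
          have hxp : ¬ ((x : Int) < (p : Int)) := skipLt_lower hpend_sorted x hx
          have hxs : x ∈ pend := (skipLt_sublist _ _).mem hx
          obtain ⟨pre, hpre⟩ := hpre
          exact ⟨hpre ▸ List.mem_append_right pre hxs, by omega⟩
        · rintro ⟨hx, hxp⟩
          have hxpend : x ∈ pend := by
            by_contra hc
            have := hinv x hx hc
            omega
          exact skipLt_mem_of hxpend (by omega)
      have hmemnl : ∀ z : Nat, z ∈ nls ↔ cs[z]? = some '\n' := by
        intro z
        rw [hnls, nl_mem cs 0 z]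
        simp
      -- SK invariants for the recursive call
      have hSKpre' : ∀ q : Nat, p ≤ q → (∃ pre, nls = pre ++ SK) ∧
          (∀ x ∈ nls, x ∉ SK → (x : Int) < (q : Int)) := by
        intro q hq
        constructor
        · obtain ⟨pre, hpre⟩ := hpre
          obtain ⟨d, hd⟩ := skipLt_suffix (p : Int) pend
          exact ⟨pre ++ d, by rw [hpre, hd, List.append_assoc]⟩
        · intro x hx hxn
          have : ¬ ((p : Int) ≤ (x : Int)) := fun hle => hxn ((hSKmem x).mpr ⟨hx, hle⟩)
          omega
      -- unfold one step of both loops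
      rw [show fixALoop maxl (f + 1) (cs.drop p) acc =
            (if ((cs.drop p).length : Int) > maxl then
              fixALoop maxl f
                (PySem.List.slice (cs.drop p)
                  (some (match rindexNl W with
                         | some j => (j : Int)
                         | none => (W.length : Int))) none)
                (acc ++ [String.ofList (PySem.List.slice W none
                  (some (match rindexNl W with
                         | some j => (j : Int)
                         | none => (W.length : Int))))])
             else acc ++ [String.ofList (cs.drop p)]) from rfl]
      rw [if_pos (by omega)]
      rw [show fixBLoop cs (cs.length : Int) maxl (f + 1) (p : Int) pend acc =
            (if (cs.length : Int) - (p : Int) > maxl then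
              fixBLoop cs (cs.length : Int) maxl f
                (match lastLt ((p : Int) + maxl) SK with
                 | some y => (y : Int)
                 | none => (p : Int) + maxl) SK
                (acc ++ [String.ofList (PySem.List.slice cs (some (p : Int))
                  (some (match lastLt ((p : Int) + maxl) SK with
                         | some y => (y : Int)
                         | none => (p : Int) + maxl)))])
             else acc ++ [String.ofList (PySem.List.slice cs (some (p : Int)) none)]) from rfl]
      rw [if_pos hcond]
      cases hr : rindexNl W with
      | some j =>
        obtain ⟨hj1, hj2⟩ := rindexNl_some hr
        have hjW : j < W.length := (List.getElem?_eq_some_iff.mp hj1).1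
        have hjw : j < w := by omega
        rw [hWget j, if_pos hjw] at hj1
        have hjmem : (p + j) ∈ nls := (hmemnl _).mpr hj1
        have hlast : lastLt ((p : Int) + maxl) SK = some (p + j) := by
          apply lastLt_eq_some hSK_sorted
          · exact (hSKmem _).mpr ⟨hjmem, by push_cast; omega⟩
          · push_cast; omega
          · intro z hz hzb
            obtain ⟨hznls, hzp⟩ := (hSKmem z).mp hz
            by_contra hc
            have hk1 : j < z - p := by omega
            have hk2 : z - p < w := by omega
            have : cs[p + (z - p)]? = some '\n' := by
              have := (hmemnl z).mp hznls
              have hzz : p + (z - p) = z := by omega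
              rw [hzz]; exact this
            have := hj2 (z - p) hk1
            rw [hWget (z - p), if_pos hk2] at this
            exact this ‹_›
        simp only [hlast]
        have hpiece : PySem.List.slice W none (some ((j : Nat) : Int))
            = PySem.List.slice cs (some ((p : Nat) : Int)) (some (((p + j : Nat)) : Int)) := by
          rw [PySem.List.slice_to_natCast, PySem.List.slice_natCast, hWtake, List.take_take]
          congr 1
          omega
        have hnext : PySem.List.slice (cs.drop p) (some ((j : Nat) : Int)) none
            = cs.drop (p + j) := by
          rw [PySem.List.slice_from_natCast, List.drop_drop]
        rw [hpiece, hnext]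
        exact ih (p + j) SK _ (by omega) (hSKpre' (p + j) (by omega)).1 (hSKpre' (p + j) (by omega)).2
      | none =>
        have hnone := rindexNl_none hr
        have hlast : lastLt ((p : Int) + maxl) SK = none := by
          apply lastLt_eq_none
          intro z hz hzb
          obtain ⟨hznls, hzp⟩ := (hSKmem z).mp hz
          have hk2 : z - p < w := by omega
          have : cs[p + (z - p)]? = some '\n' := by
            have := (hmemnl z).mp hznls
            have hzz : p + (z - p) = z := by omega
            rw [hzz]; exact this
          have := hnone (z - p)
          rw [hWget (z - p), if_pos hk2] at this
          exact this ‹_›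
        simp only [hlast]
        have hcast : (p : Int) + maxl = ((p + w : Nat) : Int) := by push_cast; omega
        have hWlenc : ((W.length : Nat) : Int) = ((w : Nat) : Int) := by rw [hWlen]
        have hpiece : PySem.List.slice W none (some ((W.length : Nat) : Int))
            = PySem.List.slice cs (some ((p : Nat) : Int)) (some ((p : Int) + maxl)) := by
          rw [hcast, hWlenc, PySem.List.slice_to_natCast, PySem.List.slice_natCast, hWtake,
            List.take_take]
          congr 1
          omega
        have hnext : PySem.List.slice (cs.drop p) (some ((W.length : Nat) : Int)) none
            = cs.drop (p + w) := by
          rw [hWlenc, PySem.List.slice_from_natCast, List.drop_drop]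
        rw [hpiece, hnext, hcast]
        exact ih (p + w) SK _ (by omega) (hSKpre' (p + w) (by omega)).1 (hSKpre' (p + w) (by omega)).2
    · -- loop exits: both append the remaining text
      rw [show fixALoop maxl (f + 1) (cs.drop p) acc =
            (if ((cs.drop p).length : Int) > maxl then
              fixALoop maxl f
                (PySem.List.slice (cs.drop p)
                  (some (match rindexNl (PySem.List.slice (cs.drop p) none (some maxl)) with
                         | some j => (j : Int)
                         | none => ((PySem.List.slice (cs.drop p) none (some maxl)).length : Int))) none)
                (acc ++ [String.ofList (PySem.List.slice (PySem.List.slice (cs.drop p) none (some maxl)) none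
                  (some (match rindexNl (PySem.List.slice (cs.drop p) none (some maxl)) with
                         | some j => (j : Int)
                         | none => ((PySem.List.slice (cs.drop p) none (some maxl)).length : Int))))])
             else acc ++ [String.ofList (cs.drop p)]) from rfl]
      rw [if_neg (by omega)]
      rw [show fixBLoop cs (cs.length : Int) maxl (f + 1) (p : Int) pend acc =
            (if (cs.length : Int) - (p : Int) > maxl then
              fixBLoop cs (cs.length : Int) maxl f
                (match lastLt ((p : Int) + maxl) (skipLt (p : Int) pend) with
                 | some y => (y : Int)
                 | none => (p : Int) + maxl) (skipLt (p : Int) pend)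
                (acc ++ [String.ofList (PySem.List.slice cs (some (p : Int))
                  (some (match lastLt ((p : Int) + maxl) (skipLt (p : Int) pend) with
                         | some y => (y : Int)
                         | none => (p : Int) + maxl)))])
             else acc ++ [String.ofList (PySem.List.slice cs (some (p : Int)) none)]) from rfl]
      rw [if_neg hcond, PySem.List.slice_from_natCast]

-- ===== VERDICT (by name: the statement is the Claim_ definition above) =====
theorem fix_max_length_spec : Claim_equal_fix_max_length := by
  intro t ml _ hpre
  unfold Spec_fix_max_length fix_max_length fix_max_length_alt
  by_cases h : (t.toList.length : Int) ≤ ml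
  · simp only [if_pos h]
  · simp only [if_neg h]
    have hml : 1 ≤ ml := by
      rcases hpre with h1 | ⟨h1, _⟩
      · exact absurd h1 h
      · exact h1
    have := loop_eq t.toList ml (by omega) (t.toList.length + 1) 0 (nlIndicesFrom 0 t.toList) []
      (by omega) ⟨[], rfl⟩ (fun x hx hnx => absurd hx hnx)
    simpa using this
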